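-- pv_equiv track=rewrite | github.com/DreamyPhobic/AskDB | env_tools.py | is_likely_secret
-- ===== SOURCE A (Python) =====
-- from typing import Dict, Mapping, Sequence
--
-- def is_likely_secret(key: str) -> bool:
--     token = key.upper()
--     indicators: Sequence[str] = (
--         "KEY",
--         "TOKEN",
--         "SECRET",
--         "PASSWORD",
--         "PASS",
--         "PWD",
--         "BEARER",
--         "API",
--         "DATABASE",
--         "DB",
--         "URL",
--         "ENDPOINT",
--     )
--     return any(ind in token for ind in indicators)
-- ===== SOURCE B (Python) =====
-- _BY_FIRST = {
--     "K": ("KEY",),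
--     "T": ("TOKEN",),
--     "S": ("SECRET",),
--     "P": ("PASSWORD", "PASS", "PWD"),
--     "B": ("BEARER",),
--     "A": ("API",),
--     "D": ("DATABASE", "DB"),
--     "U": ("URL",),
--     "E": ("ENDPOINT",),
-- }
--
-- def is_likely_secret(key: str) -> bool:
--     token = key.upper()
--     return any(
--         token.startswith(ind, i)
--         for i, c in enumerate(token)
--         for ind in _BY_FIRST.get(c, ())
--     )
-- ===== Notes on version B (the rewrite author's own statement) =====
-- stated objective: alternative
-- what changed: Replaced twelve independent membership substring scans with a single left-to-right pass over the uppercased key that, at each position, dispatches on the first character to the few indicators that can start there and checks them with startswith.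
import Mathlib
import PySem

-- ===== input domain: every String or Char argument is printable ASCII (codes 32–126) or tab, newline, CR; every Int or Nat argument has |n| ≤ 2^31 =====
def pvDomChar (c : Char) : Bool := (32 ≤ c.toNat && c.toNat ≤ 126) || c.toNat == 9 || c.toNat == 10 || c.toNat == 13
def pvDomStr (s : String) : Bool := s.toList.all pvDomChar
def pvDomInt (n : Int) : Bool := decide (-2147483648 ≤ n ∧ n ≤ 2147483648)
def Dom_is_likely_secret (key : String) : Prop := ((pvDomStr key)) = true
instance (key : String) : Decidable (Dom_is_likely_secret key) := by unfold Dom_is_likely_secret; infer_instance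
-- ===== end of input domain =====

-- B replaces A's twelve independent `in` substring scans by ONE left-to-right pass over the
-- uppercased key with a first-character dispatch table (objective: alternative).

-- ===== PORT A =====
def pvIndicators : List String :=
  ["KEY", "TOKEN", "SECRET", "PASSWORD", "PASS", "PWD",
   "BEARER", "API", "DATABASE", "DB", "URL", "ENDPOINT"]

def is_likely_secret (key : String) : Bool :=
  let token := PySem.Str.upper key
  pvIndicators.any (fun ind => PySem.Str.isIn ind token)

-- ===== PORT B =====
-- _BY_FIRST.get(c, ()) of Source B (keys are single characters, so the dict is a function of the char)
def pvByFirst (c : Char) : List (List Char) :=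
  if c = 'K' then ["KEY".toList]
  else if c = 'T' then ["TOKEN".toList]
  else if c = 'S' then ["SECRET".toList]
  else if c = 'P' then ["PASSWORD".toList, "PASS".toList, "PWD".toList]
  else if c = 'B' then ["BEARER".toList]
  else if c = 'A' then ["API".toList]
  else if c = 'D' then ["DATABASE".toList, "DB".toList]
  else if c = 'U' then ["URL".toList]
  else if c = 'E' then ["ENDPOINT".toList]
  else []

-- the generator: for each position i (suffix c :: rest), token.startswith(ind, i) for the dispatched inds
def pvScan : List Char → Bool
  | [] => false
  | c :: rest => (pvByFirst c).any (fun s => s.isPrefixOf (c :: rest)) || pvScan rest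

def is_likely_secret_alt (key : String) : Bool :=
  pvScan (PySem.Str.upper key).toList

-- ===== PRECONDITION & SPEC =====
def Spec_is_likely_secret (key : String) (out : Bool) : Prop := out = is_likely_secret_alt key
instance (key : String) (out : Bool) : Decidable (Spec_is_likely_secret key out) := by unfold Spec_is_likely_secret; infer_instance

-- ===== CLAIM (what is proved, stated in full; the proofs are below) =====
def Claim_equal_is_likely_secret : Prop := ∀ (key : String), Dom_is_likely_secret key → Spec_is_likely_secret key (is_likely_secret key)

-- ===== LEMMAS AND PROOFS =====

-- at one position, the dispatched checks find exactly what checking all 12 indicators would find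
theorem pvByFirst_step (c : Char) (rest : List Char) :
    (pvByFirst c).any (fun s => s.isPrefixOf (c :: rest))
      = (pvIndicators.map String.toList).any (fun s => s.isPrefixOf (c :: rest)) := by
  unfold pvByFirst pvIndicators
  split_ifs with h1 h2 h3 h4 h5 h6 h7 h8 h9 <;>
    first
      | simp [List.isPrefixOf, beq_iff_eq, Ne.symm h1, Ne.symm h2, Ne.symm h3, Ne.symm h4,
              Ne.symm h5, Ne.symm h6, Ne.symm h7, Ne.symm h8, Ne.symm h9]
      | (subst_vars; simp [List.isPrefixOf])

theorem pvScan_iff (cs : List Char) :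
    pvScan cs = true ↔ ∃ s ∈ pvIndicators.map String.toList, s <:+: cs := by
  induction cs with
  | nil =>
    simp [pvScan, pvIndicators, List.infix_nil]
  | cons c rest ih =>
    rw [pvScan, Bool.or_eq_true, pvByFirst_step, ih, List.any_eq_true]
    constructor
    · rintro (⟨s, hs, hp⟩ | ⟨s, hs, hi⟩)
      · exact ⟨s, hs, (List.isPrefixOf_iff_prefix.mp hp).isInfix⟩
      · exact ⟨s, hs, hi.trans (List.suffix_cons c rest).isInfix⟩
    · rintro ⟨s, hs, hi⟩
      rcases List.infix_cons_iff.mp hi with hp | hi'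
      · exact Or.inl ⟨s, hs, List.isPrefixOf_iff_prefix.mpr hp⟩
      · exact Or.inr ⟨s, hs, hi'⟩

-- ===== VERDICT (by name: the statement is the Claim_ definition above) =====
theorem is_likely_secret_spec : Claim_equal_is_likely_secret := by
  intro key _
  unfold Spec_is_likely_secret is_likely_secret is_likely_secret_alt
  apply Bool.coe_iff_coe.mp
  rw [pvScan_iff, List.any_eq_true]
  constructor
  · rintro ⟨ind, hind, hin⟩
    exact ⟨ind.toList, List.mem_map_of_mem hind, (PySem.Str.isIn_iff_infix ind (PySem.Str.upper key)).mp hin⟩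
  · rintro ⟨s, hs, hi⟩
    rcases List.mem_map.mp hs with ⟨ind, hind, rfl⟩
    exact ⟨ind, hind, (PySem.Str.isIn_iff_infix ind (PySem.Str.upper key)).mpr hi⟩
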